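-- pv_equiv track=rewrite | github.com/garisian/bacon_degree | bacon_functions.py | invert_actor_dict
-- ===== SOURCE A (Python) =====
-- def invert_actor_dict(actor_dict):
--     '''Return a dictionary that is the inverse of actor_dict. The original
--     actor_dict maps actors (string) to lists of movies (string) in which they
--     have appeared. The returned dictionary maps movies (string) to lists of
--     actors (string) appearing in the movie.'''
--
--     inversed_actor_dict = {}
--     if actor_dict == {}:                        # If the dictionary is empty,
--         return {}                               # return an empty dictionary
--     else:
--         for actor in actor_dict:
--             for movie in actor_dict[actor]:
--
--                 #Checks every movie for every actor in act_dict.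
--                 if movie not in inversed_actor_dict:
--
--                     #if the movie is not in the dictionary, add it with the list
--                     #of its actors
--                     inversed_actor_dict[movie] = list([actor])
--
--                 else:
--
--                     #if the movie already exists in the dictionary, simply add
--                     #the actors to that list
--                     if actor not in inversed_actor_dict[movie]:
--                         inversed_actor_dict[movie].append(actor)
--                     else:
--                         pass
--         return inversed_actor_dict
-- ===== SOURCE B (Python) =====
-- def invert_actor_dict(actor_dict):
--     movies = dict.fromkeys(m for ms in actor_dict.values() for m in ms)
--     return {m: [a for a, ms in actor_dict.items() if m in ms] for m in movies}
-- ===== Notes on version B (the rewrite author's own statement) =====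
-- stated objective: alternative
-- what changed: Replaces A's single fused pass that grows the result dict per (actor, movie) with membership-guarded appends by a two-phase transpose: first collect the distinct movies in first-appearance order, then build each movie's actor list directly with one comprehension that re-scans the actor dict, so the result lists are never mutated or scanned.
import Mathlib
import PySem

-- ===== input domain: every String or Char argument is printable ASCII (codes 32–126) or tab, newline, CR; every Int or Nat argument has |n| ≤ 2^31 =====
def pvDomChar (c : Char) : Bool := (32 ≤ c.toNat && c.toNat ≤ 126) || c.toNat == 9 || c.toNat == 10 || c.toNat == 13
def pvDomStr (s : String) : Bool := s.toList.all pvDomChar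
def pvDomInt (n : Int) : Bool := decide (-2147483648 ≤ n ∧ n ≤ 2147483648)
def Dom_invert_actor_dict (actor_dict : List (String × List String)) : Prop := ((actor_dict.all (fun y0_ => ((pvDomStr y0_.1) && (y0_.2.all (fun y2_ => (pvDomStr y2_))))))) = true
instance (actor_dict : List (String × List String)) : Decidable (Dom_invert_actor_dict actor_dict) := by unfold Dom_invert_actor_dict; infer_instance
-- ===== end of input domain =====

-- B replaces A's fused incremental pass (grow the result dict with membership-guarded appends)
-- by a two-phase transpose: collect the distinct movies in first-appearance order, then build
-- each movie's actor list with one comprehension re-scanning the actors; objective: alternative.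

-- ===== PORT A =====
-- A's inner loop body: one movie of one actor, branches in A's order.
def pvStepA (actor : String) (inv : PySem.Dict String (List String)) (movie : String) :
    PySem.Dict String (List String) :=
  if inv.contains movie = false then
    inv.insert movie [actor]
  else
    if (inv.getD movie []).contains actor = false then
      inv.insert movie ((inv.getD movie []) ++ [actor])
    else
      inv

def invert_actor_dict (actor_dict : List (String × List String)) : List (String × List String) :=
  let d := PySem.Dict.ofList actor_dict
  if d.items = [] then
    []
  else
    (d.keys.foldl
      (fun inv actor => (d.getD actor []).foldl (pvStepA actor) inv)
      (PySem.Dict.empty : PySem.Dict String (List String))).items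

-- ===== PORT B =====
-- movies = dict.fromkeys(flattened movie lists); then per movie a comprehension over the actors.
def invert_actor_dict_alt (actor_dict : List (String × List String)) : List (String × List String) :=
  let d := PySem.Dict.ofList actor_dict
  let movies := PySem.List.dedup (d.values.flatMap (fun ms => ms))
  movies.map (fun m => (m, (d.items.filter (fun p => p.2.contains m)).map (·.1)))

-- ===== PRECONDITION & SPEC =====
def Spec_invert_actor_dict (actor_dict : List (String × List String)) (out : List (String × List String)) : Prop := out = invert_actor_dict_alt actor_dict
instance (actor_dict : List (String × List String)) (out : List (String × List String)) : Decidable (Spec_invert_actor_dict actor_dict out) := by unfold Spec_invert_actor_dict; infer_instance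

-- ===== CLAIM (what is proved, stated in full; the proofs are below) =====
def Claim_equal_invert_actor_dict : Prop := ∀ (actor_dict : List (String × List String)), Dom_invert_actor_dict actor_dict → Spec_invert_actor_dict actor_dict (invert_actor_dict actor_dict)

-- ===== LEMMAS AND PROOFS =====

-- Inner-loop invariant: folding actor `a`'s movie list `ms` over a dict whose items are the
-- nodup movie list `M` mapped to `f m`, `a` appended on the already-seen movies `S ⊆ M`,
-- appends the fresh movies of `ms` to `M` and records `a` once per movie of `ms`.
theorem pv_inner (a : String) (ms : List String) :
    ∀ (M S : List String) (f : String → List String),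
      M.Nodup → (∀ m, a ∉ f m) → (∀ m, m ∉ M → f m = []) → (∀ m ∈ S, m ∈ M) →
      (ms.foldl (pvStepA a)
          (PySem.Dict.mk (M.map (fun m => (m, f m ++ (if m ∈ S then [a] else [])))))).items
        = (PySem.Set.update M ms).map
            (fun m => (m, f m ++ (if m ∈ S ∨ m ∈ ms then [a] else []))) := by
  induction ms with
  | nil =>
    intro M S f hM ha hf0 hS
    simp [PySem.Set.update_nil]
  | cons m' rest ih =>
    intro M S f hM ha hf0 hS
    rw [List.foldl_cons]
    have hkeys : (PySem.Dict.mk (M.map (fun m => (m, f m ++ (if m ∈ S then [a] else []))))).keys = M := by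
      show List.map (fun x => x.1) (List.map (fun m => (m, f m ++ (if m ∈ S then [a] else []))) M) = M
      rw [List.map_map]
      exact List.map_id M
    by_cases hm' : m' ∈ M
    · -- movie already a key
      have hc : (PySem.Dict.mk (M.map (fun m => (m, f m ++ (if m ∈ S then [a] else []))))).contains m' = true := by
        rw [PySem.Dict.contains_mk]
        simp only [List.any_map, List.any_eq_true]
        exact ⟨m', hm', by simp⟩
      have hmem : (m', f m' ++ (if m' ∈ S then [a] else []))
          ∈ (PySem.Dict.mk (M.map (fun m => (m, f m ++ (if m ∈ S then [a] else []))))).items :=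
        List.mem_map.mpr ⟨m', hm', rfl⟩
      have hgetD : (PySem.Dict.mk (M.map (fun m => (m, f m ++ (if m ∈ S then [a] else []))))).getD m' []
          = f m' ++ (if m' ∈ S then [a] else []) :=
        PySem.Dict.getD_of_mem_items _ hmem (by rw [hkeys]; exact hM) []
      by_cases hs' : m' ∈ S
      · -- actor already recorded for this movie: no change
        have hstep : pvStepA a (PySem.Dict.mk (M.map (fun m => (m, f m ++ (if m ∈ S then [a] else []))))) m'
            = PySem.Dict.mk (M.map (fun m => (m, f m ++ (if m ∈ S then [a] else [])))) := by
          unfold pvStepA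
          rw [hc, hgetD, if_pos hs']
          simp
        rw [hstep, ih M S f hM ha hf0 hS]
        rw [PySem.Set.update_cons, PySem.Set.add_of_mem hm']
        refine List.map_congr_left (fun m hm => ?_)
        have : (m ∈ S ∨ m ∈ m' :: rest) ↔ (m ∈ S ∨ m ∈ rest) := by
          simp only [List.mem_cons]
          constructor
          · rintro (h | h | h)
            · exact Or.inl h
            · exact Or.inl (h ▸ hs')
            · exact Or.inr h
          · tauto
        rw [if_congr this rfl rfl]
      · -- append the actor to this movie's list
        have hca : (f m').contains a = false := by
          simpa using ha m'
        have hstep : pvStepA a (PySem.Dict.mk (M.map (fun m => (m, f m ++ (if m ∈ S then [a] else []))))) m'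
            = PySem.Dict.mk (M.map (fun m => (m, f m ++ (if m ∈ S ++ [m'] then [a] else [])))) := by
          unfold pvStepA
          rw [hc, hgetD, if_neg hs']
          rw [if_neg (show ¬(true = false) by decide)]
          rw [List.append_nil, hca, if_pos rfl]
          apply PySem.Dict.ext
          rw [PySem.Dict.items_insert_of_contains _ _ hc]
          show (M.map _).map _ = M.map _
          rw [List.map_map]
          refine List.map_congr_left (fun m hm => ?_)
          by_cases hmm : m = m'
          · subst hmm
            simp [hs']
          · simp only [Function.comp_apply, beq_iff_eq, hmm, if_false]
            rw [if_congr (show (m ∈ S) ↔ (m ∈ S ++ [m']) by simp [hmm]) rfl rfl]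
        rw [hstep, ih M (S ++ [m']) f hM ha hf0
            (by intro m hm
                rcases List.mem_append.mp hm with h | h
                · exact hS m h
                · simp at h; subst h; exact hm')]
        rw [PySem.Set.update_cons, PySem.Set.add_of_mem hm']
        refine List.map_congr_left (fun m hm => ?_)
        rw [if_congr (show (m ∈ S ++ [m'] ∨ m ∈ rest) ↔ (m ∈ S ∨ m ∈ m' :: rest) by
              simp only [List.mem_append, List.mem_cons]; tauto) rfl rfl]
    · -- new movie: appended with [a]
      have hc : (PySem.Dict.mk (M.map (fun m => (m, f m ++ (if m ∈ S then [a] else []))))).contains m' = false := by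
        rw [PySem.Dict.contains_mk]
        simp only [List.any_map, List.any_eq_false, Function.comp_apply, beq_iff_eq]
        intro m hm he; exact hm' (he ▸ hm)
      have hstep : pvStepA a (PySem.Dict.mk (M.map (fun m => (m, f m ++ (if m ∈ S then [a] else []))))) m'
          = PySem.Dict.mk ((M ++ [m']).map (fun m => (m, f m ++ (if m ∈ S ++ [m'] then [a] else [])))) := by
        unfold pvStepA
        rw [hc, if_pos rfl]
        apply PySem.Dict.ext
        rw [PySem.Dict.items_insert_of_not_contains _ _ hc]
        rw [List.map_append]
        congr 1
        · refine List.map_congr_left (fun m hm => ?_)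
          have hne : m ≠ m' := fun he => hm' (he ▸ hm)
          rw [if_congr (show (m ∈ S) ↔ (m ∈ S ++ [m']) by simp [hne]) rfl rfl]
        · simp only [List.map_cons, List.map_nil]
          rw [hf0 m' hm']
          simp
      rw [hstep, ih (M ++ [m']) (S ++ [m']) f
          (by rw [List.nodup_append]
              exact ⟨hM, List.nodup_singleton m', by
                intro x hx y hy
                simp only [List.mem_singleton] at hy
                subst hy
                exact fun he => hm' (he ▸ hx)⟩)
          ha
          (by intro m hm
              exact hf0 m (fun h => hm (List.mem_append.mpr (Or.inl h))))
          (by intro m hm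
              rcases List.mem_append.mp hm with h | h
              · exact List.mem_append.mpr (Or.inl (hS m h))
              · exact List.mem_append.mpr (Or.inr h))]
      rw [PySem.Set.update_cons, PySem.Set.add_of_not_mem hm']
      refine List.map_congr_left (fun m hm => ?_)
      rw [if_congr (show (m ∈ S ++ [m'] ∨ m ∈ rest) ↔ (m ∈ S ∨ m ∈ m' :: rest) by
            simp only [List.mem_append, List.mem_cons]; tauto) rfl rfl]

-- Outer-loop invariant, over an actor list with distinct names.
theorem pv_outer (pr : List (String × List String)) (h : (pr.map (·.1)).Nodup) :
    (pr.foldl (fun inv p => p.2.foldl (pvStepA p.1) inv)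
        (PySem.Dict.empty : PySem.Dict String (List String))).items
      = (PySem.Set.ofList (pr.flatMap (·.2))).map
          (fun m => (m, (pr.filter (fun p => p.2.contains m)).map (·.1))) := by
  induction pr using List.reverseRecOn with
  | nil => rfl
  | append_singleton pr q ih =>
    rw [List.map_append] at h
    have h3 := List.nodup_append.mp h
    have hmap : (pr.map (·.1)).Nodup := h3.1
    have hq : q.1 ∉ pr.map (·.1) := fun hmem => h3.2.2 q.1 hmem q.1 (by simp) rfl
    rw [List.foldl_append]
    simp only [List.foldl_cons, List.foldl_nil]
    have hieq : (pr.foldl (fun inv p => p.2.foldl (pvStepA p.1) inv)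
        (PySem.Dict.empty : PySem.Dict String (List String)))
        = PySem.Dict.mk ((PySem.Set.ofList (pr.flatMap (·.2))).map
            (fun m => (m, (pr.filter (fun p => p.2.contains m)).map (·.1) ++ (if m ∈ ([] : List String) then [q.1] else [])))) := by
      apply PySem.Dict.ext
      simpa using ih hmap
    rw [hieq]
    rw [pv_inner q.1 q.2 _ [] _ (PySem.Set.nodup_ofList _)
        (by intro m hm
            simp only [List.mem_map] at hm
            obtain ⟨p, hp, hpe⟩ := hm
            exact hq (List.mem_map.mpr ⟨p, (List.mem_filter.mp hp).1, hpe⟩))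
        (by intro m hm
            rw [List.filter_eq_nil_iff.mpr]
            · rfl
            · intro p hp hc
              exact hm ((PySem.Set.mem_ofList _ _).mpr (List.mem_flatMap.mpr ⟨p, hp, by simpa using hc⟩)))
        (by intro m hm; simp at hm)]
    rw [show pr ++ [q] = pr ++ [q] from rfl]
    rw [List.flatMap_append, PySem.Set.ofList_append]
    simp only [List.flatMap_cons, List.flatMap_nil, List.append_nil]
    apply List.map_congr_left
    intro m hm
    simp only [List.not_mem_nil, false_or, List.filter_append, List.map_append]
    congr 1
    by_cases hmq : m ∈ q.2
    · rw [if_pos hmq, List.filter_cons, if_pos (by simpa using hmq)]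
      simp
    · rw [if_neg hmq, List.filter_cons, if_neg (by simpa using hmq)]
      simp

-- ===== VERDICT (by name: the statement is the Claim_ definition above) =====
theorem invert_actor_dict_spec : Claim_equal_invert_actor_dict := by
  intro actor_dict _
  unfold Spec_invert_actor_dict invert_actor_dict invert_actor_dict_alt
  set d := PySem.Dict.ofList actor_dict with hd
  have hnk : d.keys.Nodup := PySem.Dict.nodup_keys_ofList actor_dict
  have hkeys : d.keys = d.items.map (·.1) := rfl
  have hmovies : PySem.List.dedup (d.values.flatMap (fun ms => ms))
      = PySem.Set.ofList (d.items.flatMap (·.2)) := by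
    show PySem.Set.ofList _ = _
    congr 1
    show (d.items.map (·.2)).flatMap _ = _
    simp [List.flatMap_map]
  simp only []
  rw [hmovies]
  by_cases h0 : d.items = []
  · simp [h0]
  · rw [if_neg h0]
    rw [hkeys, List.foldl_map]
    rw [PySem.List.foldl_congr_mem _ _ (fun inv p => p.2.foldl (pvStepA p.1) inv) _
        (by intro acc p hp
            have : d.getD p.1 [] = p.2 :=
              PySem.Dict.getD_of_mem_items d (by exact (Prod.mk.eta ▸ hp)) hnk []
            rw [this])]
    rw [pv_outer d.items (hkeys ▸ hnk)]
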